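-- pv_equiv track=rewrite | github.com/saladuit/Mastering_Mixology_Simulator | old_scripts/mastering_mixology_optimizer.py | subsets_two_same
-- ===== SOURCE A (Python) =====
-- from itertools import combinations_with_replacement, combinations
-- from collections import Counter, defaultdict
--
-- def subsets_two_same(potions):
--     # potions like (A,A,B) or (A,B,B)
--     # Generate all non-empty multisets from potions with duplicates
--     c = Counter(potions)
--     pot_ids = list(c.elements())  # e.g. ['A', 'A', 'B']
--     # Generate unique multisets of sizes 1,2,3 considering duplicates
--     result = set()
--     for size in range(1,4):
--         for comb in combinations(pot_ids, size):
--             # To avoid duplicates, sort tuple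
--             result.add(tuple(sorted(comb)))
--     return sorted(result)
-- ===== SOURCE B (Python) =====
-- from collections import Counter
--
-- def subsets_two_same(potions):
--     # Budget-bounded count-vector enumeration: recursively choose how many copies
--     # of each distinct potion to keep, never exceeding a total of 3, so only the
--     # small sub-multisets are ever built (no drawing of all combinations).
--     c = Counter(potions)
--     items = list(c.items())
--
--     def rec(i, budget):
--         if budget == 0 or i == len(items):
--             return [[]]
--         k, cnt = items[i]
--         out = []
--         for m in range(min(cnt, budget) + 1):
--             for rest in rec(i + 1, budget - m):
--                 out.append([k] * m + rest)
--         return out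
--
--     result = set()
--     for ms in rec(0, 3):
--         if ms:
--             result.add(tuple(sorted(ms)))
--     return sorted(result)
-- ===== Notes on version B (the rewrite author's own statement) =====
-- stated objective: alternative
-- what changed: B enumerates the sub-multisets directly as count vectors: a budget-bounded recursion over the distinct potions chooses how many copies of each to keep (total at most 3), instead of A's drawing of all size-1..3 combinations from the full duplicate-bearing list and deduplicating them through a set.
import Mathlib
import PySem

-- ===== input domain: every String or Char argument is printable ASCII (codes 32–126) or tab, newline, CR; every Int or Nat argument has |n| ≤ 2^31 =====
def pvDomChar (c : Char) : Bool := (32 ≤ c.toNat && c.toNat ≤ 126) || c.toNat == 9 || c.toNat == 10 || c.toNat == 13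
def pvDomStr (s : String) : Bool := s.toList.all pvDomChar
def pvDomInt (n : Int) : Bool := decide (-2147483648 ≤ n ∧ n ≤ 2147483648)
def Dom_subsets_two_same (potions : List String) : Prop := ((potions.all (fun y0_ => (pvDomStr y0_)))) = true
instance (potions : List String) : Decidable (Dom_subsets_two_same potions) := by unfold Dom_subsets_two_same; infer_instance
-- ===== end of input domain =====

-- B replaces A's draw-all-combinations-then-dedup by a direct count-vector enumeration
-- over the distinct potions (alternative decomposition, same result).

-- ===== PORT A =====
-- Counter.elements(): each key repeated its count, in key-insertion order
def pvElements (d : PySem.Dict String Int) : List String :=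
  d.items.flatMap (fun kv => List.replicate kv.2.toNat kv.1)

def subsets_two_same (potions : List String) : List (List String) :=
  let c := PySem.Dict.counter potions
  let pot_ids := pvElements c
  let result : PySem.Set (List String) :=
    (PySem.List.pyRange 1 4 1).foldl (fun r size =>
      (PySem.List.combinations pot_ids size.toNat).foldl
        (fun r comb => PySem.Set.add r (PySem.List.sorted comb (fun x => x))) r)
      PySem.Set.empty
  PySem.List.sorted result (fun x => x)

-- ===== PORT B =====
-- rec(i, budget): the sub-multisets of items[i:] of total size ≤ budget
-- (recursion on the index i becomes structural recursion on the suffix of items)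
def pvRec (items : List (String × Int)) (budget : Int) : List (List String) :=
  if budget = 0 then [[]]
  else
    match items with
    | [] => [[]]
    | kv :: rest =>
      (PySem.List.pyRange 0 (min kv.2 budget + 1) 1).flatMap
        (fun m => (pvRec rest (budget - m)).map (List.replicate m.toNat kv.1 ++ ·))

def subsets_two_same_alt (potions : List String) : List (List String) :=
  let c := PySem.Dict.counter potions
  let items := c.items
  let result : PySem.Set (List String) :=
    (pvRec items 3).foldl (fun r ms =>
      if ms ≠ [] then PySem.Set.add r (PySem.List.sorted ms (fun x => x)) else r)
      PySem.Set.empty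
  PySem.List.sorted result (fun x => x)

-- ===== PRECONDITION & SPEC =====
def Spec_subsets_two_same (potions : List String) (out : List (List String)) : Prop := out = subsets_two_same_alt potions
instance (potions : List String) (out : List (List String)) : Decidable (Spec_subsets_two_same potions out) := by unfold Spec_subsets_two_same; infer_instance

-- ===== CLAIM (what is proved, stated in full; the proofs are below) =====
def Claim_equal_subsets_two_same : Prop := ∀ (potions : List String), Dom_subsets_two_same potions → Spec_subsets_two_same potions (subsets_two_same potions)

-- ===== LEMMAS AND PROOFS =====

-- Both programs return `sorted(set)`; shared characterisation of the set members:
-- t is an ordered non-empty sub-multiset of `potions` of size at most 3.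
def pvGood (potions t : List String) : Prop :=
  List.Subperm t potions ∧ 1 ≤ t.length ∧ t.length ≤ 3 ∧ t.Pairwise (fun a b => a ≤ b)

-- the set A builds, and the set B builds (the ports are `sorted` of these)
def pvASet (potions : List String) : PySem.Set (List String) :=
  (PySem.List.pyRange 1 4 1).foldl (fun r size =>
    (PySem.List.combinations (pvElements (PySem.Dict.counter potions)) size.toNat).foldl
      (fun r comb => PySem.Set.add r (PySem.List.sorted comb (fun x => x))) r)
    PySem.Set.empty

def pvBSet (potions : List String) : PySem.Set (List String) :=
  (pvRec ((PySem.Dict.counter potions).items) 3).foldl (fun r ms =>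
    if ms ≠ [] then PySem.Set.add r (PySem.List.sorted ms (fun x => x)) else r)
    PySem.Set.empty

lemma pvA_eq (p : List String) :
    subsets_two_same p = PySem.List.sorted (pvASet p) (fun x => x) := rfl

lemma pvB_eq (p : List String) :
    subsets_two_same_alt p = PySem.List.sorted (pvBSet p) (fun x => x) := rfl

-- membership and nodup of the two accumulation loops
lemma pv_mem_foldl2 {α β γ : Type} [BEq γ] [LawfulBEq γ] (l : List α) (g : α → List β)
    (f : β → γ) (s : PySem.Set γ) (y : γ) :
    y ∈ l.foldl (fun r a => (g a).foldl (fun r c => PySem.Set.add r (f c)) r) s ↔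
      y ∈ s ∨ ∃ a ∈ l, ∃ c ∈ g a, y = f c := by
  induction l generalizing s with
  | nil => simp
  | cons a l ih =>
    rw [List.foldl_cons, ih, PySem.Set.mem_foldl_add]
    constructor
    · rintro ((h | ⟨c, hc, rfl⟩) | ⟨b, hb, c, hc, rfl⟩)
      · exact Or.inl h
      · exact Or.inr ⟨a, List.mem_cons_self, c, hc, rfl⟩
      · exact Or.inr ⟨b, List.mem_cons_of_mem _ hb, c, hc, rfl⟩
    · rintro (h | ⟨b, hb, c, hc, rfl⟩)
      · exact Or.inl (Or.inl h)
      · rcases List.mem_cons.mp hb with rfl | hb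
        · exact Or.inl (Or.inr ⟨c, hc, rfl⟩)
        · exact Or.inr ⟨b, hb, c, hc, rfl⟩

lemma pv_nodup_foldl2 {α β γ : Type} [BEq γ] [LawfulBEq γ] (l : List α) (g : α → List β)
    (f : β → γ) (s : PySem.Set γ) (hs : s.Nodup) :
    (l.foldl (fun r a => (g a).foldl (fun r c => PySem.Set.add r (f c)) r) s).Nodup := by
  induction l generalizing s with
  | nil => exact hs
  | cons a l ih =>
    rw [List.foldl_cons, ← PySem.Set.update_map_eq_foldl_add]
    exact ih _ (PySem.Set.nodup_update _ _ hs)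

lemma pv_mem_foldl_if {β γ : Type} [BEq γ] [LawfulBEq γ] (l : List β) (p : β → Prop)
    [DecidablePred p] (f : β → γ) (s : PySem.Set γ) (y : γ) :
    y ∈ l.foldl (fun r b => if p b then PySem.Set.add r (f b) else r) s ↔
      y ∈ s ∨ ∃ b ∈ l, p b ∧ y = f b := by
  induction l generalizing s with
  | nil => simp
  | cons b l ih =>
    rw [List.foldl_cons, ih]
    by_cases h : p b
    · simp only [h, if_true, PySem.Set.mem_add, List.mem_cons]
      constructor
      · rintro ((hy | rfl) | ⟨b', hb', hpb', rfl⟩)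
        · exact Or.inl hy
        · exact Or.inr ⟨b, Or.inl rfl, h, rfl⟩
        · exact Or.inr ⟨b', Or.inr hb', hpb', rfl⟩
      · rintro (hy | ⟨b', (rfl | hb'), hpb', rfl⟩)
        · exact Or.inl (Or.inl hy)
        · exact Or.inl (Or.inr rfl)
        · exact Or.inr ⟨b', hb', hpb', rfl⟩
    · simp only [h, if_false, List.mem_cons]
      constructor
      · rintro (hy | ⟨b', hb', hpb', rfl⟩)
        · exact Or.inl hy
        · exact Or.inr ⟨b', Or.inr hb', hpb', rfl⟩
      · rintro (hy | ⟨b', (rfl | hb'), hpb', rfl⟩)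
        · exact Or.inl hy
        · exact absurd hpb' h
        · exact Or.inr ⟨b', hb', hpb', rfl⟩

lemma pv_nodup_foldl_if {β γ : Type} [BEq γ] [LawfulBEq γ] (l : List β) (p : β → Prop)
    [DecidablePred p] (f : β → γ) (s : PySem.Set γ) (hs : s.Nodup) :
    (l.foldl (fun r b => if p b then PySem.Set.add r (f b) else r) s).Nodup := by
  induction l generalizing s with
  | nil => exact hs
  | cons b l ih =>
    rw [List.foldl_cons]
    by_cases h : p b
    · rw [if_pos h]; exact ih _ (PySem.Set.nodup_add _ _ hs)
    · rw [if_neg h]; exact ih _ hs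

-- grouping a list by a covering duplicate-free key list is a permutation of the list
lemma pv_perm_flatMap_replicate_count (s l : List String) (hnd : s.Nodup)
    (hcov : ∀ a ∈ l, a ∈ s) :
    (s.flatMap (fun k => List.replicate (l.count k) k)).Perm l := by
  induction s generalizing l with
  | nil =>
    have hl : l = [] := List.eq_nil_iff_forall_not_mem.mpr
      (fun a ha => by simpa using hcov a ha)
    simp [hl]
  | cons k s ih =>
    rw [List.flatMap_cons]
    have hk : k ∉ s := (List.nodup_cons.mp hnd).1
    have hnd' : s.Nodup := (List.nodup_cons.mp hnd).2
    have h1 : List.replicate (l.count k) k = l.filter (· == k) := (List.filter_beq k).symm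
    have hcong : s.flatMap (fun a => List.replicate (l.count a) a)
        = s.flatMap (fun a => List.replicate ((l.filter (fun x => !(x == k))).count a) a) := by
      apply List.flatMap_congr
      intro a ha
      have hak : a ≠ k := fun h => hk (h ▸ ha)
      have hne : (fun x => !(x == k)) a = true := by simpa using hak
      rw [List.count_filter (p := fun x => !(x == k)) hne]
    have h2 : (s.flatMap (fun a => List.replicate (l.count a) a)).Perm
        (l.filter (fun x => !(x == k))) := by
      rw [hcong]
      exact ih _ hnd' (fun a ha => by
        obtain ⟨hal, hpa⟩ := List.mem_filter.mp ha
        have hak : a ≠ k := by simpa using hpa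
        rcases List.mem_cons.mp (hcov a hal) with rfl | h
        · exact absurd rfl hak
        · exact h)
    have h1p : (List.replicate (l.count k) k).Perm (l.filter (· == k)) := by rw [h1]
    exact (h1p.append h2).trans (List.filter_append_perm (· == k) l)

lemma pv_potIds_perm (p : List String) : (pvElements (PySem.Dict.counter p)).Perm p := by
  unfold pvElements
  rw [PySem.Dict.items_counter, List.flatMap_map]
  simp only [Int.toNat_natCast]
  exact pv_perm_flatMap_replicate_count _ p (PySem.Set.nodup_ofList p)
    (fun a ha => (PySem.Set.mem_ofList p a).mpr ha)

lemma pv_zip_self_map {α β : Type} (l : List α) (f : α → β) :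
    l.zip (l.map f) = l.map (fun a => (a, f a)) := by
  induction l with
  | nil => rfl
  | cons a l ih => simp [ih]

-- the bound each choice respects, and the multiset a choice vector denotes
def pvB (m : Int) (kv : String × Int) : Prop := 0 ≤ m ∧ m ≤ kv.2

def pvFlat (items : List (String × Int)) (vec : List Int) : List String :=
  (items.zip vec).flatMap (fun q => List.replicate q.2.toNat q.1.1)

lemma pv_sum_nonneg (vec : List Int) (items : List (String × Int))
    (h : List.Forall₂ pvB vec items) : 0 ≤ vec.sum := by
  induction h with
  | nil => simp
  | cons hx _ ih => simp only [List.sum_cons]; have := hx.1; omega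

lemma pv_flat_nil (items : List (String × Int)) (vec : List Int)
    (h : List.Forall₂ pvB vec items) : vec.sum ≤ 0 → pvFlat items vec = [] := by
  induction h with
  | nil => intro _; rfl
  | @cons m kv v rest hx hF ih =>
    intro hsum
    simp only [List.sum_cons] at hsum
    have hv := pv_sum_nonneg v rest hF
    have hm : m = 0 := by have := hx.1; omega
    subst hm
    have hrest : pvFlat rest v = [] := ih (by omega)
    simp only [pvFlat, List.zip_cons_cons, List.flatMap_cons] at hrest ⊢
    simp [hrest]

lemma pv_zero_vec (items : List (String × Int)) (hpos : ∀ kv ∈ items, 0 ≤ kv.2) :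
    List.Forall₂ pvB (items.map (fun _ => (0 : Int))) items
      ∧ (items.map (fun _ => (0 : Int))).sum = 0
      ∧ pvFlat items (items.map (fun _ => (0 : Int))) = [] := by
  refine ⟨?_, by simp, ?_⟩
  · rw [List.forall₂_map_left_iff, List.forall₂_same]
    exact fun kv hkv => ⟨le_refl _, hpos kv hkv⟩
  · rw [pvFlat, pv_zip_self_map, List.flatMap_map]
    simp

lemma pv_mem_pvRec (items : List (String × Int)) (b : Int) (ms : List String)
    (hpos : ∀ kv ∈ items, 0 ≤ kv.2) (hb : 0 ≤ b) :
    ms ∈ pvRec items b ↔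
      ∃ vec, List.Forall₂ pvB vec items ∧ vec.sum ≤ b ∧ ms = pvFlat items vec := by
  induction items generalizing b ms with
  | nil =>
    rw [show pvRec [] b = [[]] from by rw [pvRec]; split <;> rfl]
    simp only [List.mem_singleton, List.forall₂_nil_right_iff]
    constructor
    · rintro rfl; exact ⟨[], rfl, by simpa using hb, rfl⟩
    · rintro ⟨vec, rfl, _, rfl⟩; rfl
  | cons kv rest ih =>
    have hpos' : ∀ q ∈ rest, 0 ≤ q.2 := fun q hq => hpos q (List.mem_cons_of_mem _ hq)
    by_cases hb0 : b = 0
    · subst hb0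
      rw [show pvRec (kv :: rest) 0 = [[]] from by rw [pvRec]; simp]
      simp only [List.mem_singleton]
      constructor
      · rintro rfl
        obtain ⟨hF, hsum, hflat⟩ := pv_zero_vec (kv :: rest) hpos
        exact ⟨_, hF, le_of_eq hsum, hflat.symm⟩
      · rintro ⟨vec, hF, hsum, rfl⟩
        exact pv_flat_nil _ _ hF hsum
    · rw [show pvRec (kv :: rest) b
          = (PySem.List.pyRange 0 (min kv.2 b + 1) 1).flatMap
              (fun m => (pvRec rest (b - m)).map (List.replicate m.toNat kv.1 ++ ·)) from by
            rw [pvRec]; simp [hb0]]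
      simp only [List.mem_flatMap, List.mem_map]
      constructor
      · rintro ⟨m, hm, r, hr, rfl⟩
        rw [PySem.List.mem_pyRange_one] at hm
        obtain ⟨vec, hF, hsum, rfl⟩ :=
          (ih (b - m) r hpos' (by omega)).mp hr
        refine ⟨m :: vec, List.Forall₂.cons ⟨hm.1, by omega⟩ hF, ?_, ?_⟩
        · simp only [List.sum_cons]; omega
        · simp [pvFlat, List.zip_cons_cons, List.flatMap_cons]
      · rintro ⟨vec, hF, hsum, rfl⟩
        rcases hF with _ | ⟨hm, hFv⟩
        rename_i m v
        have hv0 := pv_sum_nonneg v rest hFv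
        have hsv : v.sum ≤ b - m := by simp only [List.sum_cons] at hsum; omega
        refine ⟨m, ?_, pvFlat rest v, (ih (b - m) _ hpos' (by
            have := hm.1; simp only [List.sum_cons] at hsum; omega)).mpr
          ⟨v, hFv, hsv, rfl⟩, ?_⟩
        · rw [PySem.List.mem_pyRange_one]
          have h1 := hm.1
          have h2 := hm.2
          simp only [List.sum_cons] at hsum
          constructor
          · exact h1
          · omega
        · simp [pvFlat, List.zip_cons_cons, List.flatMap_cons]

lemma pv_mem_ASet (p t : List String) : t ∈ pvASet p ↔ pvGood p t := by
  unfold pvASet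
  rw [pv_mem_foldl2, (by decide : PySem.List.pyRange 1 4 1 = [1, 2, 3])]
  constructor
  · rintro (h | ⟨size, hsize, comb, hcomb, rfl⟩)
    · exact absurd h (by simp [PySem.Set.empty])
    · obtain ⟨hsub, hlen⟩ := (PySem.List.mem_combinations_iff _ _ _).mp hcomb
      have hperm := PySem.List.sorted_perm comb (fun x : String => x) false
      have hlen13 : 1 ≤ size.toNat ∧ size.toNat ≤ 3 := by
        simp only [List.mem_cons, List.not_mem_nil, or_false] at hsize
        rcases hsize with rfl | rfl | rfl <;> simp
      refine ⟨hperm.subperm.trans (hsub.subperm.trans (pv_potIds_perm p).subperm),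
        ?_, ?_, ?_⟩
      · rw [hperm.length_eq, hlen]; exact hlen13.1
      · rw [hperm.length_eq, hlen]; exact hlen13.2
      · exact PySem.List.sorted_pairwise comb (fun x => x)
  · rintro ⟨hsub, h1, h3, hpw⟩
    right
    obtain ⟨comb, hcp, hcs⟩ := hsub.trans (pv_potIds_perm p).symm.subperm
    refine ⟨(t.length : Int), ?_, comb, ?_, ?_⟩
    · simp only [List.mem_cons, List.not_mem_nil, or_false]; omega
    · rw [PySem.List.mem_combinations_iff]
      exact ⟨hcs, by rw [hcp.length_eq]; simp⟩
    · rw [(PySem.List.sorted_id_eq_sorted_id_iff_perm comb t).mpr hcp,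
        PySem.List.sorted_eq_self_of_pairwise t (fun x => x) hpw]

-- a choice of at most `c k` copies per key is a sublist of the full grouping
lemma pv_flatMap_zip_sublist (keys : List String) (c : String → Nat) (vec : List Int)
    (h : List.Forall₂ (fun (x : Int) k => x.toNat ≤ c k) vec keys) :
    List.Sublist ((keys.zip vec).flatMap (fun q => List.replicate q.2.toNat q.1))
      (keys.flatMap (fun k => List.replicate (c k) k)) := by
  induction h with
  | nil => simp
  | cons hxk _ ih =>
    simp only [List.zip_cons_cons, List.flatMap_cons]
    exact List.Sublist.append ((List.replicate_sublist_replicate _).mpr hxk) ih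

lemma pv_length_flatMap_zip (keys : List String) (vec : List Int)
    (h : List.Forall₂ (fun (x : Int) (_ : String) => 0 ≤ x) vec keys) :
    (((keys.zip vec).flatMap (fun q => List.replicate q.2.toNat q.1)).length : Int)
      = vec.sum := by
  induction h with
  | nil => simp
  | cons hx _ ih =>
    simp only [List.zip_cons_cons, List.flatMap_cons, List.length_append,
      List.length_replicate, List.sum_cons]
    omega

lemma pv_sum_natCast (l : List String) (f : String → Nat) :
    (l.map (fun a => ((f a : Nat) : Int))).sum = ((l.map f).sum : Int) := by
  induction l with
  | nil => rfl
  | cons a l ih => simp [ih]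

lemma pv_mem_BSet (p t : List String) : t ∈ pvBSet p ↔ pvGood p t := by
  have hkeysnd := PySem.Set.nodup_ofList p
  have hkp : ((PySem.Set.ofList p).flatMap
      (fun k => List.replicate (p.count k) k)).Perm p :=
    pv_perm_flatMap_replicate_count _ p hkeysnd
      (fun a ha => (PySem.Set.mem_ofList p a).mpr ha)
  have hpos : ∀ kv ∈ (PySem.Dict.counter p).items, (0 : Int) ≤ kv.2 := by
    rw [PySem.Dict.items_counter]
    intro kv hkv
    rcases List.mem_map.mp hkv with ⟨k, _, rfl⟩
    exact Int.natCast_nonneg _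
  have hzipeq : ∀ vec : List Int, pvFlat ((PySem.Dict.counter p).items) vec
      = ((PySem.Set.ofList p).zip vec).flatMap
          (fun q => List.replicate q.2.toNat q.1) := by
    intro vec
    simp [pvFlat, PySem.Dict.items_counter, List.zip_map_left, List.flatMap_map, Prod.map]
  unfold pvBSet
  rw [pv_mem_foldl_if]
  constructor
  · rintro (h | ⟨ms, hms, hne, rfl⟩)
    · exact absurd h (by simp [PySem.Set.empty])
    · obtain ⟨vec, hF, hsum, rfl⟩ :=
        (pv_mem_pvRec _ 3 _ hpos (by norm_num)).mp hms
      have hF' : List.Forall₂ (fun (x : Int) (k : String) => 0 ≤ x ∧ x.toNat ≤ p.count k)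
          vec (PySem.Set.ofList p) := by
        rw [PySem.Dict.items_counter, List.forall₂_map_right_iff] at hF
        refine hF.imp (fun x k hx => ?_)
        obtain ⟨h0, hle⟩ := hx
        exact ⟨h0, by omega⟩
      rw [hzipeq] at hne ⊢
      have hsubl := pv_flatMap_zip_sublist (PySem.Set.ofList p) (fun k => p.count k) vec
        (hF'.imp (fun _ _ hx => hx.2))
      have hperm := PySem.List.sorted_perm
        (((PySem.Set.ofList p).zip vec).flatMap (fun q => List.replicate q.2.toNat q.1))
        (fun x : String => x) false
      have hlen := pv_length_flatMap_zip (PySem.Set.ofList p) vec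
        (hF'.imp (fun _ _ hx => hx.1))
      have hpos' : (((PySem.Set.ofList p).zip vec).flatMap
          (fun q => List.replicate q.2.toNat q.1)).length ≠ 0 :=
        fun h => hne (List.eq_nil_of_length_eq_zero h)
      refine ⟨hperm.subperm.trans (hsubl.subperm.trans hkp.subperm), ?_, ?_, ?_⟩
      · rw [hperm.length_eq]; omega
      · rw [hperm.length_eq]; omega
      · exact PySem.List.sorted_pairwise _ (fun x => x)
  · rintro ⟨hsub, h1, h3, hpw⟩
    right
    have hcovt : ∀ a ∈ t, a ∈ PySem.Set.ofList p :=
      fun a ha => (PySem.Set.mem_ofList p a).mpr (hsub.subset ha)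
    have hpermt : ((PySem.Set.ofList p).flatMap
        (fun k => List.replicate (t.count k) k)).Perm t :=
      pv_perm_flatMap_replicate_count _ t hkeysnd hcovt
    have hnatsum : ((PySem.Set.ofList p).map (fun k => t.count k)).sum = t.length := by
      have := hpermt.length_eq
      rw [List.length_flatMap] at this
      simpa using this
    have hsum : ((((PySem.Dict.counter p).items).map
        (fun kv => ((t.count kv.1 : Nat) : Int))).sum) = (t.length : Int) := by
      rw [PySem.Dict.items_counter, List.map_map]
      have hcomp : ((fun kv : String × Int => ((t.count kv.1 : Nat) : Int))
          ∘ (fun k => (k, (p.count k : Int)))) = fun k => ((t.count k : Nat) : Int) := rfl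
      rw [hcomp, pv_sum_natCast, hnatsum]
    have hsv : pvFlat ((PySem.Dict.counter p).items)
          (((PySem.Dict.counter p).items).map (fun kv => ((t.count kv.1 : Nat) : Int)))
        = (PySem.Set.ofList p).flatMap (fun k => List.replicate (t.count k) k) := by
      rw [pvFlat, pv_zip_self_map, List.flatMap_map, PySem.Dict.items_counter,
        List.flatMap_map]
      simp
    have hF : List.Forall₂ pvB
        (((PySem.Dict.counter p).items).map (fun kv => ((t.count kv.1 : Nat) : Int)))
        ((PySem.Dict.counter p).items) := by
      rw [List.forall₂_map_left_iff, List.forall₂_same]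
      intro kv hkv
      rw [PySem.Dict.items_counter] at hkv
      rcases List.mem_map.mp hkv with ⟨k, hk, rfl⟩
      have hc1 : t.count k ≤ p.count k := by
        by_cases hkt : k ∈ t
        · exact List.subperm_ext_iff.mp hsub k hkt
        · simp [List.count_eq_zero.mpr hkt]
      exact ⟨Int.natCast_nonneg _, by dsimp only; omega⟩
    refine ⟨pvFlat ((PySem.Dict.counter p).items)
        (((PySem.Dict.counter p).items).map (fun kv => ((t.count kv.1 : Nat) : Int))),
      (pv_mem_pvRec _ 3 _ hpos (by norm_num)).mpr ⟨_, hF, by omega, rfl⟩, ?_, ?_⟩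
    · rw [hsv]
      intro hnil
      have := hpermt.length_eq
      rw [hnil] at this
      simp at this
      omega
    · rw [hsv, (PySem.List.sorted_id_eq_sorted_id_iff_perm _ t).mpr hpermt,
        PySem.List.sorted_eq_self_of_pairwise t (fun x => x) hpw]

-- the two ports pick core's LT/DecidableLT instances on List String while the PySem
-- order lemmas are stated at the LinearOrder instances; the comparators decide the
-- same relation, so the sorts are equal
lemma pv_sorted_congr {α κ : Type} {i1 i2 : LT κ} {d1 : @DecidableLT κ i1}
    {d2 : @DecidableLT κ i2} (xs : List α) (key : α → κ)
    (h : ∀ a b : α, @decide (@LT.lt κ i1 (key a) (key b)) (d1 (key a) (key b))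
        = @decide (@LT.lt κ i2 (key a) (key b)) (d2 (key a) (key b))) :
    @PySem.List.sorted α κ i1 d1 xs key false = @PySem.List.sorted α κ i2 d2 xs key false := by
  rw [@PySem.List.sorted_eq_foldl_insertBy α κ i1 d1 xs key,
      @PySem.List.sorted_eq_foldl_insertBy α κ i2 d2 xs key]
  have hfun : (fun (a b : α) => @decide (@LT.lt κ i1 (key a) (key b)) (d1 (key a) (key b)))
      = (fun a b => @decide (@LT.lt κ i2 (key a) (key b)) (d2 (key a) (key b))) := by
    funext a b; exact h a b
  rw [hfun]

lemma pv_sorted_port_eq (xs : List (List String)) :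
    PySem.List.sorted xs (fun x => x)
      = @PySem.List.sorted (List String) (List String)
          (List.instLinearOrder.toLT)
          (List.instLinearOrder.toDecidableLT)
          xs (fun x => x) false :=
  pv_sorted_congr xs (fun x => x)
    (fun _ _ => decide_eq_decide.mpr ⟨fun h => h, fun h => h⟩)

-- ===== VERDICT (by name: the statement is the Claim_ definition above) =====
theorem subsets_two_same_spec : Claim_equal_subsets_two_same := by
  intro p _
  show subsets_two_same p = subsets_two_same_alt p
  rw [pvA_eq, pvB_eq, pv_sorted_port_eq, pv_sorted_port_eq]
  have hA : (pvASet p).Nodup := pv_nodup_foldl2 _ _ _ _ List.nodup_nil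
  have hB : (pvBSet p).Nodup := pv_nodup_foldl_if _ _ _ _ List.nodup_nil
  exact (PySem.List.sorted_id_eq_sorted_id_iff_perm _ _).mpr
    ((List.perm_ext_iff_of_nodup hA hB).mpr
      (fun t => (pv_mem_ASet p t).trans (pv_mem_BSet p t).symm))
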